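-- pv_equiv track=rewrite | github.com/SQLRambo/rackbeat_export_products_with_units | fetch_product_units.py | get_product_number_field
-- ===== SOURCE A (Python) =====
-- from typing import Dict, Iterable, List, Sequence
--
-- def get_product_number_field(fieldnames: Sequence[str] | None) -> str | None:
--     if not fieldnames:
--         return None
--
--     normalized: Dict[str, str] = {name.strip().lower(): name for name in fieldnames}
--     candidates = [
--         "product_number",
--         "productnumber",
--         "product no",
--         "product_no",
--         "product nr",
--         "productnr",
--         "itemnumber",
--         "sku",
--         "varenummer",
--     ]
--     for candidate in candidates:
--         if candidate in normalized:
--             return normalized[candidate]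
--
--     return fieldnames[0]
-- ===== SOURCE B (Python) =====
-- def get_product_number_field(fieldnames):
--     if not fieldnames:
--         return None
--     candidates = [
--         "product_number",
--         "productnumber",
--         "product no",
--         "product_no",
--         "product nr",
--         "productnr",
--         "itemnumber",
--         "sku",
--         "varenummer",
--     ]
--     rank = {c: i for i, c in enumerate(candidates)}
--     best_rank = None
--     best_name = None
--     for name in fieldnames:
--         r = rank.get(name.strip().lower())
--         if r is not None and (best_rank is None or r <= best_rank):
--             best_rank = r
--             best_name = name
--     return best_name if best_name is not None else fieldnames[0]
-- ===== Notes on version B (the rewrite author's own statement) =====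
-- stated objective: alternative
-- what changed: Instead of building a normalized->original dict and scanning the fixed candidate list in priority order, B builds a candidate->rank dict once and makes a single pass over the fieldnames keeping the best (rank, name) pair with a last-wins <= update.
import Mathlib
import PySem

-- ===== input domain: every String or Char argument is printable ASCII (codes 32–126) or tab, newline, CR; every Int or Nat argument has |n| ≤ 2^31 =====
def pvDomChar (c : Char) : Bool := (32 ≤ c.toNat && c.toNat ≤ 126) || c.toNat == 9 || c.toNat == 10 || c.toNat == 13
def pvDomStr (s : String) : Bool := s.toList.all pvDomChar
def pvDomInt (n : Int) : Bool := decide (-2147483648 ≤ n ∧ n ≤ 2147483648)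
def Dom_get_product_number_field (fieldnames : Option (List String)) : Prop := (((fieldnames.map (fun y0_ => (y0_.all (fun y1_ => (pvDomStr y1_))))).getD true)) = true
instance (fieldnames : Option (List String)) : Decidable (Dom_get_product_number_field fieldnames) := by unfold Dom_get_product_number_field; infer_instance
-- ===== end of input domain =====

-- B replaces A's candidate-priority scan over a normalized dict by one pass over the
-- fieldnames keeping a best (rank, name) pair via a rank dict (objective: alternative).

-- shared constant: the candidate list (identical literal in both Pythons)
def pvCandidates : List String :=
  ["product_number", "productnumber", "product no", "product_no", "product nr",
   "productnr", "itemnumber", "sku", "varenummer"]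

-- name.strip().lower()
def pvNorm (s : String) : String := PySem.Str.lower (PySem.Str.strip s)

-- ===== PORT A =====
-- the 'for candidate in candidates: if candidate in normalized: return normalized[candidate]' loop
def pvFindCand (d : PySem.Dict String String) : List String → Option String
  | [] => none
  | c :: cs =>
    match d.get? c with
    | some v => some v
    | none => pvFindCand d cs

def get_product_number_field (fieldnames : Option (List String)) : Option String :=
  match fieldnames with
  | none => none               -- 'if not fieldnames: return None'
  | some l =>
    if l = [] then none        -- 'if not fieldnames: return None'
    else
      -- normalized = {name.strip().lower(): name for name in fieldnames}
      let normalized := l.foldl (fun d name => d.insert (pvNorm name) name) PySem.Dict.empty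
      match pvFindCand normalized pvCandidates with
      | some v => some v
      | none => PySem.List.pyGet? l 0   -- 'return fieldnames[0]'

-- ===== PORT B =====
-- rank = {c: i for i, c in enumerate(candidates)}
def pvRank : PySem.Dict String Int :=
  (PySem.List.enumerate pvCandidates 0).foldl (fun d p => d.insert p.2 p.1) PySem.Dict.empty

-- the loop body: r = rank.get(name.strip().lower()); update best on r ≤ best_rank
def pvStep (best : Option (Int × String)) (name : String) : Option (Int × String) :=
  match pvRank.get? (pvNorm name) with
  | none => best
  | some r =>
    match best with
    | none => some (r, name)
    | some (j, _) => if r ≤ j then some (r, name) else best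

def get_product_number_field_alt (fieldnames : Option (List String)) : Option String :=
  match fieldnames with
  | none => none
  | some l =>
    if l = [] then none
    else
      match l.foldl pvStep none with
      | some (_, n) => some n                 -- 'return best_name'
      | none => PySem.List.pyGet? l 0         -- 'return fieldnames[0]'

-- ===== PRECONDITION & SPEC =====
def Spec_get_product_number_field (fieldnames : Option (List String)) (out : Option String) : Prop := out = get_product_number_field_alt fieldnames
instance (fieldnames : Option (List String)) (out : Option String) : Decidable (Spec_get_product_number_field fieldnames out) := by unfold Spec_get_product_number_field; infer_instance

-- ===== CLAIM (what is proved, stated in full; the proofs are below) =====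
def Claim_equal_get_product_number_field : Prop := ∀ (fieldnames : Option (List String)), Dom_get_product_number_field fieldnames → Spec_get_product_number_field fieldnames (get_product_number_field fieldnames)

-- ===== LEMMAS AND PROOFS =====

-- proof-side: the indexed version of A's candidate scan
def pvFindI (d : PySem.Dict String String) : List (Int × String) → Option (Int × String)
  | [] => none
  | (i, c) :: cs =>
    match d.get? c with
    | some v => some (i, v)
    | none => pvFindI d cs

def pvRCands : List (Int × String) := PySem.List.enumerate pvCandidates 0

lemma pvFindCand_eq_map (d : PySem.Dict String String) :
    ∀ rcs : List (Int × String), pvFindCand d (rcs.map Prod.snd) = (pvFindI d rcs).map Prod.snd := by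
  intro rcs
  induction rcs with
  | nil => rfl
  | cons p rest ih =>
    obtain ⟨i, c⟩ := p
    simp only [List.map_cons, pvFindCand, pvFindI]
    cases d.get? c <;> simp [ih]

lemma pvFindI_mem (d : PySem.Dict String String) :
    ∀ rcs : List (Int × String), ∀ j m, pvFindI d rcs = some (j, m) → ∃ c, (j, c) ∈ rcs := by
  intro rcs
  induction rcs with
  | nil => intro j m h; simp [pvFindI] at h
  | cons p rest ih =>
    obtain ⟨i, c⟩ := p
    intro j m h
    simp only [pvFindI] at h
    cases hg : d.get? c with
    | some v => rw [hg] at h; simp at h; exact ⟨c, by simp [h.1]⟩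
    | none =>
      rw [hg] at h
      obtain ⟨c', hc'⟩ := ih j m h
      exact ⟨c', by simp [hc']⟩

lemma pvFindI_insert_not_mem (d : PySem.Dict String String) (k x : String) :
    ∀ rcs : List (Int × String), k ∉ rcs.map Prod.snd →
      pvFindI (d.insert k x) rcs = pvFindI d rcs := by
  intro rcs
  induction rcs with
  | nil => intro _; rfl
  | cons p rest ih =>
    obtain ⟨i, c⟩ := p
    intro h
    simp only [List.map_cons, List.mem_cons] at h
    push Not at h
    simp only [pvFindI, PySem.Dict.get?_insert_of_ne d x (Ne.symm h.1)]
    cases d.get? c <;> simp [ih h.2]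

lemma pvFindI_insert (i : Int) (k x : String) (d : PySem.Dict String String) :
    ∀ pre post : List (Int × String), k ∉ pre.map Prod.snd →
      (∀ p ∈ pre, p.1 < i) → (∀ p ∈ post, i < p.1) →
      pvFindI (d.insert k x) (pre ++ (i, k) :: post) =
        match pvFindI d (pre ++ (i, k) :: post) with
        | none => some (i, x)
        | some (j, m) => if i ≤ j then some (i, x) else some (j, m) := by
  intro pre
  induction pre with
  | nil =>
    intro post _ _ hgt
    simp only [List.nil_append, pvFindI, PySem.Dict.get?_insert_self]
    cases hg : d.get? k with
    | some v => simp
    | none =>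
      cases hf : pvFindI d post with
      | none => simp
      | some jm =>
        obtain ⟨j, m⟩ := jm
        obtain ⟨c, hc⟩ := pvFindI_mem d post j m hf
        have : i < j := hgt _ hc
        simp [le_of_lt this]
  | cons p rest ih =>
    intro post hmem hlt hgt
    obtain ⟨j0, c0⟩ := p
    simp only [List.map_cons, List.mem_cons] at hmem
    push Not at hmem
    have hj0 : j0 < i := hlt (j0, c0) (by simp)
    simp only [List.cons_append, pvFindI, PySem.Dict.get?_insert_of_ne d x (Ne.symm hmem.1)]
    cases d.get? c0 with
    | some v => simp [not_le.mpr hj0]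
    | none => exact ih post hmem.2 (fun p hp => hlt p (by simp [hp])) hgt

-- pvRank.get? k = none when k is not a candidate (9 disequalities)
lemma pvRank_get?_none (k : String)
    (h : k ∉ pvCandidates) : pvRank.get? k = none := by
  simp only [pvCandidates, List.mem_cons, List.not_mem_nil, or_false] at h
  push Not at h
  obtain ⟨h0, h1, h2, h3, h4, h5, h6, h7, h8⟩ := h
  have e : pvRank = PySem.Dict.mk
      [("product_number", 0), ("productnumber", 1), ("product no", 2), ("product_no", 3),
       ("product nr", 4), ("productnr", 5), ("itemnumber", 6), ("sku", 7), ("varenummer", 8)] := by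
    decide
  rw [e]
  simp only [PySem.Dict.get?_mk_cons]
  simp only [show ("product_number" == k) = false from beq_eq_false_iff_ne.mpr (Ne.symm h0),
    show ("productnumber" == k) = false from beq_eq_false_iff_ne.mpr (Ne.symm h1),
    show ("product no" == k) = false from beq_eq_false_iff_ne.mpr (Ne.symm h2),
    show ("product_no" == k) = false from beq_eq_false_iff_ne.mpr (Ne.symm h3),
    show ("product nr" == k) = false from beq_eq_false_iff_ne.mpr (Ne.symm h4),
    show ("productnr" == k) = false from beq_eq_false_iff_ne.mpr (Ne.symm h5),
    show ("itemnumber" == k) = false from beq_eq_false_iff_ne.mpr (Ne.symm h6),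
    show ("sku" == k) = false from beq_eq_false_iff_ne.mpr (Ne.symm h7),
    show ("varenummer" == k) = false from beq_eq_false_iff_ne.mpr (Ne.symm h8)]
  rfl

-- one concrete-candidate case of the step lemma
lemma pvStep_case (x c : String) (i : Int) (pre post : List (Int × String))
    (d : PySem.Dict String String)
    (hx : pvNorm x = c) (hr : pvRank.get? c = some i)
    (hsplit : pvRCands = pre ++ (i, c) :: post)
    (h1 : c ∉ pre.map Prod.snd) (h2 : ∀ p ∈ pre, p.1 < i) (h3 : ∀ p ∈ post, i < p.1) :
    pvStep (pvFindI d pvRCands) x = pvFindI (d.insert (pvNorm x) x) pvRCands := by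
  rw [hx, hsplit, pvFindI_insert i c x d pre post h1 h2 h3]
  simp only [pvStep, hx, hr]
  cases pvFindI d (pre ++ (i, c) :: post) with
  | none => rfl
  | some jm => obtain ⟨j, m⟩ := jm; rfl

-- the main step lemma: one loop iteration of B = inserting one name into A's dict
lemma pvStep_findI (d : PySem.Dict String String) (x : String) :
    pvStep (pvFindI d pvRCands) x = pvFindI (d.insert (pvNorm x) x) pvRCands := by
  by_cases hmem : pvNorm x ∈ pvCandidates
  · simp only [pvCandidates, List.mem_cons, List.not_mem_nil, or_false] at hmem
    rcases hmem with h | h | h | h | h | h | h | h | h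
    · exact pvStep_case x "product_number" 0 [] [(1, "productnumber"), (2, "product no"), (3, "product_no"), (4, "product nr"), (5, "productnr"), (6, "itemnumber"), (7, "sku"), (8, "varenummer")] d h (by decide) (by decide) (by decide) (by decide) (by decide)
    · exact pvStep_case x "productnumber" 1 [(0, "product_number")] [(2, "product no"), (3, "product_no"), (4, "product nr"), (5, "productnr"), (6, "itemnumber"), (7, "sku"), (8, "varenummer")] d h (by decide) (by decide) (by decide) (by decide) (by decide)
    · exact pvStep_case x "product no" 2 [(0, "product_number"), (1, "productnumber")] [(3, "product_no"), (4, "product nr"), (5, "productnr"), (6, "itemnumber"), (7, "sku"), (8, "varenummer")] d h (by decide) (by decide) (by decide) (by decide) (by decide)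
    · exact pvStep_case x "product_no" 3 [(0, "product_number"), (1, "productnumber"), (2, "product no")] [(4, "product nr"), (5, "productnr"), (6, "itemnumber"), (7, "sku"), (8, "varenummer")] d h (by decide) (by decide) (by decide) (by decide) (by decide)
    · exact pvStep_case x "product nr" 4 [(0, "product_number"), (1, "productnumber"), (2, "product no"), (3, "product_no")] [(5, "productnr"), (6, "itemnumber"), (7, "sku"), (8, "varenummer")] d h (by decide) (by decide) (by decide) (by decide) (by decide)
    · exact pvStep_case x "productnr" 5 [(0, "product_number"), (1, "productnumber"), (2, "product no"), (3, "product_no"), (4, "product nr")] [(6, "itemnumber"), (7, "sku"), (8, "varenummer")] d h (by decide) (by decide) (by decide) (by decide) (by decide)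
    · exact pvStep_case x "itemnumber" 6 [(0, "product_number"), (1, "productnumber"), (2, "product no"), (3, "product_no"), (4, "product nr"), (5, "productnr")] [(7, "sku"), (8, "varenummer")] d h (by decide) (by decide) (by decide) (by decide) (by decide)
    · exact pvStep_case x "sku" 7 [(0, "product_number"), (1, "productnumber"), (2, "product no"), (3, "product_no"), (4, "product nr"), (5, "productnr"), (6, "itemnumber")] [(8, "varenummer")] d h (by decide) (by decide) (by decide) (by decide) (by decide)
    · exact pvStep_case x "varenummer" 8 [(0, "product_number"), (1, "productnumber"), (2, "product no"), (3, "product_no"), (4, "product nr"), (5, "productnr"), (6, "itemnumber"), (7, "sku")] [] d h (by decide) (by decide) (by decide) (by decide) (by decide)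
  · rw [pvStep, pvRank_get?_none _ hmem,
      pvFindI_insert_not_mem d _ x pvRCands (by
        have : (pvRCands.map Prod.snd) = pvCandidates := by decide
        rw [this]; exact hmem)]

lemma pvInvariant (l : List String) :
    l.foldl pvStep none =
      pvFindI (l.foldl (fun d name => d.insert (pvNorm name) name) PySem.Dict.empty) pvRCands := by
  induction l using List.reverseRecOn with
  | nil => decide
  | append_singleton l x ih =>
    rw [List.foldl_append, List.foldl_append]
    simp only [List.foldl_cons, List.foldl_nil]
    rw [ih, pvStep_findI]

-- ===== VERDICT (by name: the statement is the Claim_ definition above) =====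
theorem get_product_number_field_spec : Claim_equal_get_product_number_field := by
  intro fieldnames _
  unfold Spec_get_product_number_field get_product_number_field get_product_number_field_alt
  cases fieldnames with
  | none => rfl
  | some l =>
    by_cases hl : l = []
    · simp [hl]
    · simp only [hl, if_false]
      rw [pvInvariant l,
        show pvCandidates = pvRCands.map Prod.snd from by decide,
        pvFindCand_eq_map]
      cases pvFindI (l.foldl (fun d name => d.insert (pvNorm name) name) PySem.Dict.empty) pvRCands with
      | none => rfl
      | some jm => obtain ⟨j, m⟩ := jm; rfl
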